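-- pv_equiv track=rewrite | github.com/Ihniwimd/battle_royale_sim | Objs/Display/HTMLWriter.py | massInsertTag
-- ===== SOURCE A (Python) =====
-- def massInsertTag(desc, findString, insertString):
--     stringList = desc.split(findString)
--     if len(stringList) == 1:
--         return desc
--     for i in range(len(stringList)):
--         if i>0:
--             if not stringList[i].lower().startswith('.jpg') and not stringList[i].lower().startswith('.png') and not stringList[i].lower().startswith('.gif'):
--                 stringList[i] = "</" + insertString + ">" + stringList[i]
--         if i<len(stringList)-1:
--             # Massive kludge. I didn't realize this would be a problem, so a lot of the images are named the same as the characters. Then again, this whole object is a kludge :p.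
--             if not stringList[i+1].lower().startswith('.jpg') and not stringList[i+1].lower().startswith('.png') and not stringList[i+1].lower().startswith('.gif'):
--                 stringList[i] = stringList[i] + "<" + insertString + ">"
--     return findString.join(stringList)
-- ===== SOURCE B (Python) =====
-- def massInsertTag(desc, findString, insertString):
--     parts = desc.split(findString)
--     if len(parts) == 1:
--         return desc
--     out = parts[0]
--     for p in parts[1:]:
--         low = p.lower()
--         if low.startswith('.jpg') or low.startswith('.png') or low.startswith('.gif'):
--             out += findString + p
--         else:
--             out += "<" + insertString + ">" + findString + "</" + insertString + ">" + p
--     return out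
-- ===== Notes on version B (the rewrite author's own statement) =====
-- stated objective: simpler
-- what changed: B replaces A's index loop that mutates the split list twice per element (a guarded prepend keyed on the element itself and a guarded append keyed on the next element) plus a final join by a single left-to-right string build: start from parts[0] and, for each following piece, append either findString+piece or '<tag>'+findString+'</tag>'+piece depending on one image-extension test on that piece, exploiting that A's two guards at each boundary share the same condition.
import Mathlib
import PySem

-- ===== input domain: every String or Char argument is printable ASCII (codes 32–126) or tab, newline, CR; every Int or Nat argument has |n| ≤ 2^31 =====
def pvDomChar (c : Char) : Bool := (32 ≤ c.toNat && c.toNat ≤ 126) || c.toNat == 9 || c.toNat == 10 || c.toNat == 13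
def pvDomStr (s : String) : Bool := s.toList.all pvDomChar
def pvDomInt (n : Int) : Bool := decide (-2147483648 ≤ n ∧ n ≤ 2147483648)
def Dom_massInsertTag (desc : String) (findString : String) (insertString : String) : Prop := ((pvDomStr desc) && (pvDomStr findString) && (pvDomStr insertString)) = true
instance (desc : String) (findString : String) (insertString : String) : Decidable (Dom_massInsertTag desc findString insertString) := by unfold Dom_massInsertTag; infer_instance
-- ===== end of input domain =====

-- ===== PORT A =====
-- B changes A's double guarded list-mutation per boundary into one string build per piece (objective: simpler).
def pvNoImg (p : String) : Bool :=
  !(PySem.Str.startswith (PySem.Str.lower p) ".jpg")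
  && !(PySem.Str.startswith (PySem.Str.lower p) ".png")
  && !(PySem.Str.startswith (PySem.Str.lower p) ".gif")

-- first statement of A's loop body: the guarded prepend at index i
def pvStepA1 (insertString : String) (l : List String) (i : Int) : List String :=
  if 0 < i then
    match PySem.List.pyGet? l i with
    | some s => if pvNoImg s then l.set i.toNat ("</" ++ insertString ++ ">" ++ s) else l
    | none => l
  else l

-- second statement of A's loop body: the guarded append at index i, keyed on index i+1
def pvStepA2 (insertString : String) (l1 : List String) (i : Int) : List String :=
  if i < (l1.length : Int) - 1 then
    match PySem.List.pyGet? l1 (i + 1) with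
    | some s1 =>
      if pvNoImg s1 then
        match PySem.List.pyGet? l1 i with
        | some s0 => l1.set i.toNat (s0 ++ "<" ++ insertString ++ ">")
        | none => l1
      else l1
    | none => l1
  else l1

def pvStepA (insertString : String) (l : List String) (i : Int) : List String :=
  pvStepA2 insertString (pvStepA1 insertString l i) i

def massInsertTag (desc : String) (findString : String) (insertString : String) : String :=
  match PySem.Str.split? desc findString with
  | none => ""   -- desc.split("") raises ValueError in Python; excluded by Pre_
  | some stringList =>
    if stringList.length == 1 then desc
    else
      PySem.Str.join findString
        ((PySem.List.pyRange 0 stringList.length 1).foldl (pvStepA insertString) stringList)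

-- ===== PORT B =====
def pvIsImg (p : String) : Bool :=
  let low := PySem.Str.lower p
  PySem.Str.startswith low ".jpg" || PySem.Str.startswith low ".png" || PySem.Str.startswith low ".gif"

def pvBodyB (findString insertString out p : String) : String :=
  if pvIsImg p then out ++ (findString ++ p)
  else out ++ ("<" ++ insertString ++ ">" ++ findString ++ "</" ++ insertString ++ ">" ++ p)

def massInsertTag_alt (desc : String) (findString : String) (insertString : String) : String :=
  match PySem.Str.split? desc findString with
  | none => ""   -- desc.split("") raises ValueError in Python; excluded by Pre_
  | some parts =>
    if parts.length == 1 then desc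
    else
      match parts with
      | [] => ""   -- totality guard: parts[0] on an empty list (never produced by split)
      | p0 :: rest => rest.foldl (pvBodyB findString insertString) p0

-- ===== PRECONDITION & SPEC =====
-- Pre_ excludes findString = "", on which Python's str.split raises ValueError: empty separator.
def Pre_massInsertTag (desc : String) (findString : String) (insertString : String) : Prop :=
  findString ≠ ""
instance (desc : String) (findString : String) (insertString : String) : Decidable (Pre_massInsertTag desc findString insertString) := by unfold Pre_massInsertTag; infer_instance
def pvWitness_massInsertTag : String × String × String := ("a cat.jpg and a cat", "cat", "b")

def Spec_massInsertTag (desc : String) (findString : String) (insertString : String) (out : String) : Prop := out = massInsertTag_alt desc findString insertString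
instance (desc : String) (findString : String) (insertString : String) (out : String) : Decidable (Spec_massInsertTag desc findString insertString out) := by unfold Spec_massInsertTag; infer_instance

-- ===== CLAIM (what is proved, stated in full; the proofs are below) =====
def Claim_equal_massInsertTag : Prop := ∀ (desc : String) (findString : String) (insertString : String), Dom_massInsertTag desc findString insertString → Pre_massInsertTag desc findString insertString → Spec_massInsertTag desc findString insertString (massInsertTag desc findString insertString)

-- ===== LEMMAS AND PROOFS =====

theorem pvNoImg_eq_not_isImg (p : String) : pvNoImg p = !pvIsImg p := by
  simp [pvNoImg, pvIsImg]

-- the value A's loop leaves at index j, in terms of the original split list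
def pvFinal (ins : String) (parts : List String) (j : Nat) : String :=
  (if 0 < j ∧ pvNoImg (parts.getD j "") then "</" ++ ins ++ ">" ++ parts.getD j "" else parts.getD j "")
    ++ (if j + 1 < parts.length ∧ pvNoImg (parts.getD (j+1) "") then "<" ++ ins ++ ">" else "")

def pvState (ins : String) (parts : List String) (k : Nat) : List String :=
  (List.range parts.length).map (fun j => if j < k then pvFinal ins parts j else parts.getD j "")

theorem pvState_length (ins : String) (parts : List String) (k : Nat) :
    (pvState ins parts k).length = parts.length := by
  simp [pvState]

theorem pvState_zero (ins : String) (parts : List String) : pvState ins parts 0 = parts := by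
  apply List.ext_getElem?
  intro j
  simp only [pvState, List.getElem?_map, List.getElem?_range]
  by_cases hj : j < parts.length
  · simp [hj, List.getD_eq_getElem?_getD, List.getElem?_eq_getElem hj]
  · simp [hj, List.getElem?_eq_none (Nat.le_of_not_lt hj)]

theorem pvState_getElem? (ins : String) (parts : List String) (k j : Nat) (hj : j < parts.length) :
    (pvState ins parts k)[j]? = some (if j < k then pvFinal ins parts j else parts.getD j "") := by
  simp [pvState, List.getElem?_map, List.getElem?_range, hj]

theorem pvState_succ_set (ins : String) (parts : List String) (k : Nat) (hk : k < parts.length) :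
    pvState ins parts (k+1) = (pvState ins parts k).set k (pvFinal ins parts k) := by
  apply List.ext_getElem?
  intro j
  by_cases hj : j < parts.length
  · rw [pvState_getElem? ins parts (k+1) j hj, List.getElem?_set,
      pvState_getElem? ins parts k j hj]
    by_cases hjk : j = k
    · subst hjk
      simp [pvState_length, hj, Nat.lt_succ_self]
    · have h2 : (k = j) = False := by simp [Ne.symm hjk]
      simp only [h2, if_false]
      have h3 : (j < k + 1) ↔ (j < k) := by omega
      simp only [h3]
  · have h1 : parts.length ≤ j := Nat.le_of_not_lt hj
    rw [List.getElem?_eq_none (by simpa [pvState_length] using h1),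
      List.getElem?_eq_none (by simpa [pvState_length] using h1)]

theorem pvStepA_state (ins : String) (parts : List String) (k : Nat) (hk : k < parts.length) :
    pvStepA ins (pvState ins parts k) (k : Int) = pvState ins parts (k+1) := by
  have hLlen := pvState_length ins parts k
  have hLk : PySem.List.pyGet? (pvState ins parts k) (k : Int)
      = some (parts.getD k "") := by
    rw [PySem.List.pyGet?_natCast, pvState_getElem? ins parts k k hk]
    simp
  -- phase 1
  have h1 : pvStepA1 ins (pvState ins parts k) (k : Int)
      = if 0 < k ∧ pvNoImg (parts.getD k "") then
          (pvState ins parts k).set k ("</" ++ ins ++ ">" ++ parts.getD k "")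
        else pvState ins parts k := by
    unfold pvStepA1
    rw [hLk]
    by_cases h0 : 0 < k
    · have h0' : (0:Int) < (k:Int) := by exact_mod_cast h0
      rw [if_pos h0']
      by_cases hn : pvNoImg (parts.getD k "") = true
      · simp [hn, h0]
      · simp [hn, h0]
    · have h0' : ¬ ((0:Int) < (k:Int)) := by exact_mod_cast h0
      rw [if_neg h0']
      simp [h0]
  -- phase 2 on a state whose k-th entry has been set to v
  have h2 : ∀ (v : String),
      pvStepA2 ins ((pvState ins parts k).set k v) (k : Int)
        = (pvState ins parts k).set k
            (v ++ (if k + 1 < parts.length ∧ pvNoImg (parts.getD (k+1) "") then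
              "<" ++ ins ++ ">" else "")) := by
    intro v
    have hMlen : ((pvState ins parts k).set k v).length = parts.length := by
      rw [List.length_set, hLlen]
    unfold pvStepA2
    rw [hMlen]
    by_cases hc2 : k + 1 < parts.length
    · have hlt : (k : Int) < (parts.length : Int) - 1 := by
        omega
      rw [if_pos hlt]
      have hget1 : PySem.List.pyGet? ((pvState ins parts k).set k v) ((k : Int) + 1)
          = some (parts.getD (k+1) "") := by
        have : ((k : Int) + 1) = ((k+1 : Nat) : Int) := by push_cast; ring
        rw [this, PySem.List.pyGet?_natCast, List.getElem?_set_ne (by omega),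
          pvState_getElem? ins parts k (k+1) hc2]
        simp
      rw [hget1]
      dsimp only
      have hget0 : PySem.List.pyGet? ((pvState ins parts k).set k v) (k : Int)
          = some v := by
        rw [PySem.List.pyGet?_natCast, List.getElem?_set_self (by omega)]
      by_cases hn : pvNoImg (parts.getD (k+1) "") = true
      · rw [if_pos hn, hget0]
        simp only [Int.toNat_natCast, List.set_set]
        rw [if_pos ⟨hc2, hn⟩]
        simp [String.append_assoc]
      · rw [if_neg hn]
        have : ¬ (k + 1 < parts.length ∧ pvNoImg (parts.getD (k+1) "") = true) := by
          intro h; exact hn h.2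
        rw [if_neg this, String.append_empty]
    · have hlt : ¬ ((k : Int) < (parts.length : Int) - 1) := by omega
      rw [if_neg hlt]
      have : ¬ (k + 1 < parts.length ∧ pvNoImg (parts.getD (k+1) "") = true) := by
        intro h; exact hc2 h.1
      rw [if_neg this, String.append_empty]
  -- the unconditional "set" view of phase 1
  have h1' : pvStepA1 ins (pvState ins parts k) (k : Int)
      = (pvState ins parts k).set k
          (if 0 < k ∧ pvNoImg (parts.getD k "") = true then
            "</" ++ ins ++ ">" ++ parts.getD k "" else parts.getD k "") := by
    rw [h1]
    by_cases hc1 : 0 < k ∧ pvNoImg (parts.getD k "") = true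
    · rw [if_pos hc1, if_pos hc1]
    · rw [if_neg hc1, if_neg hc1]
      have hkv : (pvState ins parts k)[k]'(by omega) = parts.getD k "" := by
        have := pvState_getElem? ins parts k k hk
        rw [List.getElem?_eq_getElem (by omega)] at this
        simp at this
        simpa using this
      conv_lhs => rw [← List.set_getElem_self (as := pvState ins parts k) (i := k) (by omega)]
      rw [hkv]
  rw [pvStepA, h1', h2, pvState_succ_set ins parts k hk]
  rfl

theorem pvFoldA (ins : String) (parts : List String) :
    ∀ (m k : Nat), k + m = parts.length →
    (PySem.List.pyRange (k : Int) (parts.length : Int) 1).foldl (pvStepA ins) (pvState ins parts k)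
      = pvState ins parts parts.length := by
  intro m
  induction m with
  | zero =>
    intro k hkm
    obtain rfl : k = parts.length := by omega
    have hnil : PySem.List.pyRange (parts.length : Int) (parts.length : Int) 1 = [] := by
      rw [PySem.List.pyRange_one]
      simp
    rw [hnil, List.foldl_nil]
  | succ m ih =>
    intro k hkm
    have hlt : (k : Int) < (parts.length : Int) := by omega
    rw [PySem.List.pyRange_one_cons hlt, List.foldl_cons,
      pvStepA_state ins parts k (by omega)]
    have hcast : ((k : Int) + 1) = (((k+1 : Nat)) : Int) := by push_cast; ring
    rw [hcast]
    exact ih (k+1) (by omega)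

def pvSuf (ins : String) : List String → String
  | [] => ""
  | q :: _ => if pvNoImg q then "<" ++ ins ++ ">" else ""

def pvTails (ins : String) : List String → List String
  | [] => []
  | q :: qs =>
      ((if pvNoImg q then "</" ++ ins ++ ">" ++ q else q) ++ pvSuf ins qs) :: pvTails ins qs

set_option maxHeartbeats 1000000 in
theorem pvTails_eq (ins : String) : ∀ (qs : List String),
    (List.range qs.length).map (fun j =>
      (if pvNoImg (qs.getD j "") then "</" ++ ins ++ ">" ++ qs.getD j "" else qs.getD j "")
        ++ (if j + 1 < qs.length ∧ pvNoImg (qs.getD (j+1) "") then "<" ++ ins ++ ">" else ""))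
      = pvTails ins qs := by
  intro qs
  induction qs with
  | nil => simp [pvTails]
  | cons q qs ih =>
    rw [pvTails]
    simp only [List.length_cons, List.range_succ_eq_map, List.map_cons, List.map_map]
    congr 1
    · cases qs with
      | nil => simp [pvSuf]
      | cons r rs => by_cases h : pvNoImg r = true <;> simp [pvSuf, h]
    · rw [← ih]
      apply List.map_congr_left
      intro j hj
      simp only [Function.comp, Nat.succ_eq_add_one, List.getD_cons_succ]
      congr 1
      congr 1
      simp [Nat.add_lt_add_iff_right]

theorem pvState_top (ins : String) (p0 : String) (rest : List String) :
    pvState ins (p0 :: rest) (p0 :: rest).length = (p0 ++ pvSuf ins rest) :: pvTails ins rest := by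
  have h1 : (List.range (p0::rest).length).map
      (fun j => if j < (p0::rest).length then pvFinal ins (p0::rest) j else (p0::rest).getD j "")
      = (List.range (p0::rest).length).map (pvFinal ins (p0::rest)) :=
    List.map_congr_left (fun j hj => by rw [if_pos (List.mem_range.mp hj)])
  rw [pvState, h1, List.length_cons, List.range_succ_eq_map, List.map_cons, List.map_map]
  congr 1
  · show pvFinal ins (p0 :: rest) 0 = _
    unfold pvFinal
    cases rest with
    | nil => simp [pvSuf]
    | cons r rs => by_cases h : pvNoImg r = true <;> simp [pvSuf, h]
  · rw [← pvTails_eq ins rest]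
    apply List.map_congr_left
    intro j hj
    simp only [Function.comp, pvFinal, List.getD_cons_succ, List.length_cons,
      Nat.zero_lt_succ, true_and, Nat.add_lt_add_iff_right]

theorem pvBodyB_append (find ins a b p : String) :
    pvBodyB find ins (a ++ b) p = a ++ pvBodyB find ins b p := by
  unfold pvBodyB
  by_cases h : pvIsImg p = true
  · rw [if_pos h, if_pos h, String.append_assoc]
  · rw [if_neg h, if_neg h, String.append_assoc]

theorem pvGo_prepend (find ins : String) (qs : List String) : ∀ (a b : String),
    qs.foldl (pvBodyB find ins) (a ++ b) = a ++ qs.foldl (pvBodyB find ins) b := by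
  induction qs with
  | nil => intro a b; rfl
  | cons q qs ih =>
    intro a b
    simp only [List.foldl_cons, pvBodyB_append]
    exact ih a _

theorem pvJoinRec (find ins : String) : ∀ (qs : List String) (a : String),
    PySem.Str.join find ((a ++ pvSuf ins qs) :: pvTails ins qs)
      = qs.foldl (pvBodyB find ins) a := by
  intro qs
  induction qs with
  | nil =>
    intro a
    rw [List.foldl_nil]
    show PySem.Str.join find [a ++ pvSuf ins []] = a
    rw [← String.toList_inj]
    simp [PySem.Str.toList_join, PySem.Chars.join_singleton, pvSuf]
  | cons q qs ih =>
    intro a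
    show PySem.Str.join find
        ((a ++ pvSuf ins (q :: qs))
          :: ((if pvNoImg q then "</" ++ ins ++ ">" ++ q else q) ++ pvSuf ins qs)
          :: pvTails ins qs) = _
    have hjc : PySem.Str.join find
        ((a ++ pvSuf ins (q :: qs))
          :: ((if pvNoImg q then "</" ++ ins ++ ">" ++ q else q) ++ pvSuf ins qs)
          :: pvTails ins qs)
        = (a ++ pvSuf ins (q :: qs)) ++ find ++ PySem.Str.join find
            (((if pvNoImg q then "</" ++ ins ++ ">" ++ q else q) ++ pvSuf ins qs)
              :: pvTails ins qs) := by
      rw [← String.toList_inj]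
      simp [PySem.Str.toList_join, PySem.Chars.join_cons_cons]
    rw [hjc, ih]
    rw [List.foldl_cons]
    have hpre : ∀ b : String, qs.foldl (pvBodyB find ins) b
        = b ++ qs.foldl (pvBodyB find ins) "" := by
      intro b
      conv_lhs => rw [show b = b ++ "" from (String.append_empty).symm]
      rw [pvGo_prepend]
    rw [hpre (if pvNoImg q then "</" ++ ins ++ ">" ++ q else q), hpre (pvBodyB find ins a q)]
    unfold pvBodyB pvSuf
    by_cases h : pvIsImg q = true
    · have hni : pvNoImg q = false := by rw [pvNoImg_eq_not_isImg, h]; rfl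
      simp only [hni, Bool.false_eq_true, if_false, if_pos h]
      rw [← String.toList_inj]
      simp
    · have hni : pvNoImg q = true := by rw [pvNoImg_eq_not_isImg]; simp [h]
      simp only [hni, if_true, if_neg h]
      rw [← String.toList_inj]
      simp

theorem pvJoin_nil (find : String) : PySem.Str.join find [] = "" := by
  rw [← String.toList_inj]
  simp [PySem.Str.toList_join, PySem.Chars.join_nil]

-- ===== VERDICT (by name: the statement is the Claim_ definition above) =====
theorem massInsertTag_spec : Claim_equal_massInsertTag := by
  intro desc find ins _ hpre
  unfold Spec_massInsertTag massInsertTag massInsertTag_alt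
  cases hsplit : PySem.Str.split? desc find with
  | none =>
    exfalso
    apply hpre
    have hmap := PySem.Str.split?_map desc find
    rw [hsplit] at hmap
    unfold PySem.Chars.split? at hmap
    by_cases he : find.toList.isEmpty = true
    · rw [← String.toList_inj]
      simpa using he
    · rw [if_neg he] at hmap
      exact absurd hmap.symm (by simp)
  | some parts =>
    by_cases hlen : parts.length == 1
    · simp [hlen]
    · simp only [hlen, Bool.false_eq_true, not_false_iff, if_neg]
      cases parts with
      | nil =>
        have hnil : PySem.List.pyRange (0 : Int) ((List.length ([] : List String)) : Int) 1 = [] := by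
          rw [PySem.List.pyRange_one]; simp
        rw [hnil, List.foldl_nil, pvJoin_nil]
      | cons p0 rest =>
        have h0 := pvFoldA ins (p0 :: rest) (p0 :: rest).length 0 (by omega)
        rw [pvState_zero] at h0
        rw [show ((0:Nat) : Int) = (0 : Int) from rfl] at h0
        rw [h0, pvState_top, pvJoinRec]
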